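-- pv_equiv track=rewrite | github.com/AndyWilliams0n/Assist-Git-App | app/agents_jira/runtime.py | _extract_parent_constraints
-- ===== SOURCE A (Python) =====
-- def _extract_parent_constraints(parent_description: str, max_items: int = 4) -> list[str]:
--     text = str(parent_description or "")
--     if not text.strip():
--         return []
--     constraints: list[str] = []
--     for raw_line in text.splitlines():
--         cleaned = raw_line.strip().lstrip("-*").strip()
--         if not cleaned:
--             continue
--         lowered = cleaned.lower()
--         if lowered in {
--             "user story",
--             "description",
--             "acceptance criteria",
--             "background",
--             "scope",
--             "requirements",
--         }:
--             continue
--         if any(token in lowered for token in ("must", "should", "include", "use", "made using")):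
--             if cleaned not in constraints:
--                 constraints.append(cleaned)
--         if len(constraints) >= max_items:
--             break
--     return constraints
-- ===== SOURCE B (Python) =====
-- def _extract_parent_constraints(parent_description: str, max_items: int = 4) -> list[str]:
--     text = str(parent_description or "")
--     if not text.strip():
--         return []
--     headers = {"user story", "description", "acceptance criteria",
--                "background", "scope", "requirements"}
--     tokens = ("must", "should", "include", "use", "made using")
--
--     def wanted(c: str) -> bool:
--         low = c.lower()
--         return bool(c) and low not in headers and any(t in low for t in tokens)
--
--     candidates = [c for c in (raw.strip().lstrip("-*").strip()
--                               for raw in text.splitlines()) if wanted(c)]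
--
--     def pick(cands: list[str], need: int) -> list[str]:
--         if need <= 0 or not cands:
--             return []
--         head, rest = cands[0], cands[1:]
--         return [head] + pick([c for c in rest if c != head], need - 1)
--
--     return pick(candidates, max_items)
-- ===== Notes on version B (the rewrite author's own statement) =====
-- stated objective: alternative
-- what changed: Replaced A's single early-exit loop with a seen-list and cap-break by a selection-style recursion on the remaining budget: first collect all eligible cleaned lines, then recursively emit the head and delete every later duplicate of it from the rest, so no seen-set, membership test or break exists.
-- intended difference: For max_items <= 0 when the first eligible (non-empty, non-header) line contains a keyword, A returns that single line (its break fires only after the append) while B returns the intended empty list, honouring the non-positive cap. — e.g. on _extract_parent_constraints("must", 0): A returns ["must"], B returns []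
import Mathlib
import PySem

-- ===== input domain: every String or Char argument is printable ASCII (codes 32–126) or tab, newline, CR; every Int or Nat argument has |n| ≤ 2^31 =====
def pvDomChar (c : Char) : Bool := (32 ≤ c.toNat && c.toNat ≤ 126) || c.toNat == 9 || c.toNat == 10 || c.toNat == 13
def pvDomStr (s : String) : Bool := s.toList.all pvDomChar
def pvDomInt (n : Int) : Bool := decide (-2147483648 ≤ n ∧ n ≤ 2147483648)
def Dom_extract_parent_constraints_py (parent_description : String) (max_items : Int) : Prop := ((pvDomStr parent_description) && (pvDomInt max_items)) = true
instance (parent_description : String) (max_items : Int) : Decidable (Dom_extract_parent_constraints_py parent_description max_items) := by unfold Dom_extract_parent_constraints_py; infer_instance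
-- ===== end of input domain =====

-- B replaces A's single early-exit loop (seen-list + cap break) by a selection-style recursion on
-- the remaining budget that emits the first candidate and deletes its later duplicates; equal
-- return values except for non-positive max_items, where A's post-append break placement lets one
-- item through (stated as D_ below); objective: alternative decomposition, no speed claim.

-- ===== PORT A =====
-- shared vocabulary of both Pythons: the cleaning expression, the header set, the keyword tuple
-- lstrip("-*") has no PySem primitive: ported exactly as dropWhile over the two stripped chars
def pvClean (raw : List Char) : List Char :=
  PySem.Chars.strip ((PySem.Chars.strip raw).dropWhile (fun c => c == '-' || c == '*'))

def pvHeaders : List (List Char) :=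
  ["user story".toList, "description".toList, "acceptance criteria".toList,
   "background".toList, "scope".toList, "requirements".toList]

def pvTokens : List (List Char) :=
  ["must".toList, "should".toList, "include".toList, "use".toList, "made using".toList]

-- A's loop, line by line: clean, skip empties and headers, append unseen keyword lines, break at the cap
def pvLoopA : List (List Char) → List (List Char) → Int → List (List Char)
  | [], constraints, _ => constraints
  | raw :: rest, constraints, max_items =>
    let cleaned := pvClean raw
    if cleaned = [] then pvLoopA rest constraints max_items
    else
      let lowered := PySem.Chars.lower cleaned
      if pvHeaders.contains lowered then pvLoopA rest constraints max_items
      else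
        let constraints' :=
          if pvTokens.any (fun t => PySem.Chars.isIn t lowered) then
            (if constraints.contains cleaned then constraints else constraints ++ [cleaned])
          else constraints
        if max_items ≤ (constraints'.length : Int) then constraints'
        else pvLoopA rest constraints' max_items

def extract_parent_constraints_py (parent_description : String) (max_items : Int) : List String :=
  let text := parent_description.toList
  if PySem.Chars.strip text = [] then []
  else (pvLoopA (PySem.Chars.splitlines text) [] max_items).map (fun cs => String.ofList cs)

-- ===== PORT B =====
-- Source B's 'wanted' predicate on a cleaned line
def pvKeep (c : List Char) : Bool :=
  !(c = []) && !(pvHeaders.contains (PySem.Chars.lower c)) &&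
    pvTokens.any (fun t => PySem.Chars.isIn t (PySem.Chars.lower c))

-- Source B's 'pick': emit the head, delete its later duplicates, recurse on the remaining budget
def pvPick : List (List Char) → Int → List (List Char)
  | [], _ => []
  | h :: rest, need =>
    if need ≤ 0 then []
    else h :: pvPick (rest.filter (fun c => !(c == h))) (need - 1)
termination_by cands _ => cands.length
decreasing_by
  simp only [List.length_unattach, List.length_cons]
  exact Nat.lt_succ_of_le ((List.length_filter_le _ _).trans (by simp))

def extract_parent_constraints_py_alt (parent_description : String) (max_items : Int) : List String :=
  let text := parent_description.toList
  if PySem.Chars.strip text = [] then []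
  else
    let candidates := ((PySem.Chars.splitlines text).map pvClean).filter pvKeep
    (pvPick candidates max_items).map (fun cs => String.ofList cs)

-- ===== PRECONDITION & SPEC =====
-- For max_items ≤ 0 with a first eligible (non-empty, non-header) line containing a keyword, A
-- returns that single line despite the non-positive cap (its break fires only after the append),
-- while B returns the intended empty list.
-- input shape, not a re-run of either program: among the cleaned lines, the first one that is
-- non-empty and not a header contains one of the keyword tokens
def D_extract_parent_constraints_py (parent_description : String) (max_items : Int) : Prop :=
  max_items ≤ 0 ∧ PySem.Chars.strip parent_description.toList ≠ [] ∧
    ((((PySem.Chars.splitlines parent_description.toList).map pvClean).find?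
        (fun c => !c.isEmpty && !pvHeaders.contains (PySem.Chars.lower c))).any
      (fun c => pvTokens.any (fun t => PySem.Chars.isIn t (PySem.Chars.lower c)))) = true
instance (parent_description : String) (max_items : Int) : Decidable (D_extract_parent_constraints_py parent_description max_items) := by unfold D_extract_parent_constraints_py; infer_instance

def Spec_extract_parent_constraints_py (parent_description : String) (max_items : Int) (out : List String) : Prop := ¬ D_extract_parent_constraints_py parent_description max_items → out = extract_parent_constraints_py_alt parent_description max_items
instance (parent_description : String) (max_items : Int) (out : List String) : Decidable (Spec_extract_parent_constraints_py parent_description max_items out) := by unfold Spec_extract_parent_constraints_py; infer_instance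

def pvDiffWitness_extract_parent_constraints_py : String × Int := ("must", 0)
def pvDiffWitnessOut_extract_parent_constraints_py : (List String) × (List String) := (["must"], [])

-- ===== CLAIM (what is proved, stated in full; the proofs are below) =====
def Claim_unchanged_extract_parent_constraints_py : Prop := ∀ (parent_description : String) (max_items : Int), Dom_extract_parent_constraints_py parent_description max_items → Spec_extract_parent_constraints_py parent_description max_items (extract_parent_constraints_py parent_description max_items)
def Claim_changed_extract_parent_constraints_py : Prop := Dom_extract_parent_constraints_py (pvDiffWitness_extract_parent_constraints_py.1) (pvDiffWitness_extract_parent_constraints_py.2) ∧ D_extract_parent_constraints_py (pvDiffWitness_extract_parent_constraints_py.1) (pvDiffWitness_extract_parent_constraints_py.2) ∧ extract_parent_constraints_py (pvDiffWitness_extract_parent_constraints_py.1) (pvDiffWitness_extract_parent_constraints_py.2) = pvDiffWitnessOut_extract_parent_constraints_py.1 ∧ extract_parent_constraints_py_alt (pvDiffWitness_extract_parent_constraints_py.1) (pvDiffWitness_extract_parent_constraints_py.2) = pvDiffWitnessOut_extract_parent_constraints_py.2 ∧ pvDiffWitnessOut_extract_parent_constraints_py.1 ≠ pvDiffWitnes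sOut_extract_parent_constraints_py.2
def Claim_exact_extract_parent_constraints_py : Prop := ∀ (parent_description : String) (max_items : Int), Dom_extract_parent_constraints_py parent_description max_items → D_extract_parent_constraints_py parent_description max_items → extract_parent_constraints_py parent_description max_items ≠ extract_parent_constraints_py_alt parent_description max_items

-- ===== LEMMAS AND PROOFS =====
-- the unlimited accumulation step (definitionally PySem.Set.add, i.e. dict.fromkeys insertion)
def pvAdd (cs : List (List Char)) (c : List Char) : List (List Char) :=
  if cs.contains c then cs else cs ++ [c]

theorem pvAdd_prefix (cs : List (List Char)) (c : List Char) : cs <+: pvAdd cs c := by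
  unfold pvAdd; split
  · exact List.prefix_rfl
  · exact ⟨[c], rfl⟩

theorem foldl_pvAdd_prefix (l : List (List Char)) (cs : List (List Char)) :
    cs <+: l.foldl pvAdd cs := by
  induction l generalizing cs with
  | nil => exact List.prefix_rfl
  | cons x xs ih => exact (pvAdd_prefix cs x).trans (ih (pvAdd cs x))

theorem foldl_pvAdd_eq_dedup (l : List (List Char)) :
    l.foldl pvAdd [] = PySem.List.dedup l := rfl

-- A's loop below its cap is "accumulate all, then truncate"
theorem pvLoopA_lt (lines : List (List Char)) (cs : List (List Char)) (mi : Int)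
    (h : (cs.length : Int) < mi) :
    pvLoopA lines cs mi = (((lines.map pvClean).filter pvKeep).foldl pvAdd cs).take mi.toNat := by
  induction lines generalizing cs with
  | nil =>
    simp only [pvLoopA, List.map_nil, List.filter_nil, List.foldl_nil]
    rw [List.take_of_length_le (by omega)]
  | cons raw rest ih =>
    simp only [pvLoopA, List.map_cons, List.filter_cons]
    by_cases hc : pvClean raw = []
    · have hk : pvKeep (pvClean raw) = false := by simp [pvKeep, hc]
      rw [if_pos hc, hk]
      simpa using ih cs h
    · by_cases hh : PySem.Chars.lower (pvClean raw) ∈ pvHeaders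
      · have hhf : pvHeaders.contains (PySem.Chars.lower (pvClean raw)) = true := by simpa using hh
        have hk : pvKeep (pvClean raw) = false := by
          simp [pvKeep]; exact fun _ hmem => absurd hh hmem
        rw [if_neg hc, hhf, if_pos rfl, hk]
        simpa using ih cs h
      · have hhf : pvHeaders.contains (PySem.Chars.lower (pvClean raw)) = false := by simpa using hh
        by_cases hkw : pvTokens.any (fun t => PySem.Chars.isIn t (PySem.Chars.lower (pvClean raw))) = true
        · have hk : pvKeep (pvClean raw) = true := by simp [pvKeep, hc, hh, hkw]
          have hadd : (if cs.contains (pvClean raw) then cs else cs ++ [pvClean raw])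
              = pvAdd cs (pvClean raw) := rfl
          rw [if_neg hc, hhf]
          simp only [Bool.false_eq_true, if_false]
          rw [hkw, if_pos rfl, hadd, hk, if_pos rfl, List.foldl_cons]
          by_cases hbr : mi ≤ ((pvAdd cs (pvClean raw)).length : Int)
          · rw [if_pos hbr]
            have hcon : cs.contains (pvClean raw) = false := by
              by_contra hcc
              have heq : pvAdd cs (pvClean raw) = cs := by
                unfold pvAdd
                rw [Bool.of_not_eq_false hcc]; simp
              rw [heq] at hbr; omega
            have hlen : (pvAdd cs (pvClean raw)).length = cs.length + 1 := by
              unfold pvAdd; rw [hcon]; simp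
            have hpre := foldl_pvAdd_prefix ((rest.map pvClean).filter pvKeep) (pvAdd cs (pvClean raw))
            conv_lhs => rw [List.prefix_iff_eq_take.mp hpre]
            congr 1
            omega
          · rw [if_neg hbr]
            exact ih (pvAdd cs (pvClean raw)) (by omega)
        · have hkwf : pvTokens.any (fun t => PySem.Chars.isIn t (PySem.Chars.lower (pvClean raw))) = false := by
            simpa using hkw
          have hk : pvKeep (pvClean raw) = false := by simp [pvKeep, hkwf]
          rw [if_neg hc, hhf, hkwf, hk]
          simp only [Bool.false_eq_true, if_false]
          rw [if_neg (not_le.mpr h)]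
          simpa using ih cs h

theorem pvLoopA_le_zero_no_kw (lines : List (List Char)) (mi : Int)
    (hmi : mi ≤ 0) (h : (((lines.map pvClean).find?
        (fun c => !c.isEmpty && !pvHeaders.contains (PySem.Chars.lower c))).any
      (fun c => pvTokens.any (fun t => PySem.Chars.isIn t (PySem.Chars.lower c)))) = false) :
    pvLoopA lines [] mi = [] := by
  induction lines with
  | nil => rfl
  | cons raw rest ih =>
    simp only [pvLoopA]
    by_cases hc : pvClean raw = []
    · rw [if_pos hc]
      exact ih (by rw [List.map_cons, List.find?_cons_of_neg (by intro hcon; simp [hc] at hcon)] at h; exact h)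
    · by_cases hh : PySem.Chars.lower (pvClean raw) ∈ pvHeaders
      · have hhf : pvHeaders.contains (PySem.Chars.lower (pvClean raw)) = true := by simpa using hh
        rw [if_neg hc, hhf, if_pos rfl]
        exact ih (by rw [List.map_cons, List.find?_cons_of_neg (by intro hcon; simp at hcon; exact absurd hh hcon.2)] at h; exact h)
      · have hhf : pvHeaders.contains (PySem.Chars.lower (pvClean raw)) = false := by simpa using hh
        have hkwf : pvTokens.any (fun t => PySem.Chars.isIn t (PySem.Chars.lower (pvClean raw))) = false := by
          have := h
          rw [List.map_cons, List.find?_cons_of_pos (by simp [hc]; exact hh)] at this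
          simpa using this
        rw [if_neg hc, hhf, hkwf]
        simp only [Bool.false_eq_true, if_false]
        rw [if_pos (by simp only [List.length_nil, Nat.cast_zero]; omega)]

theorem pvLoopA_le_zero_kw (lines : List (List Char)) (mi : Int)
    (hmi : mi ≤ 0) (h : (((lines.map pvClean).find?
        (fun c => !c.isEmpty && !pvHeaders.contains (PySem.Chars.lower c))).any
      (fun c => pvTokens.any (fun t => PySem.Chars.isIn t (PySem.Chars.lower c)))) = true) :
    pvLoopA lines [] mi ≠ [] := by
  induction lines with
  | nil => simp at h
  | cons raw rest ih =>
    simp only [pvLoopA]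
    by_cases hc : pvClean raw = []
    · rw [if_pos hc]
      exact ih (by rw [List.map_cons, List.find?_cons_of_neg (by intro hcon; simp [hc] at hcon)] at h; exact h)
    · by_cases hh : PySem.Chars.lower (pvClean raw) ∈ pvHeaders
      · have hhf : pvHeaders.contains (PySem.Chars.lower (pvClean raw)) = true := by simpa using hh
        rw [if_neg hc, hhf, if_pos rfl]
        exact ih (by rw [List.map_cons, List.find?_cons_of_neg (by intro hcon; simp at hcon; exact absurd hh hcon.2)] at h; exact h)
      · have hhf : pvHeaders.contains (PySem.Chars.lower (pvClean raw)) = false := by simpa using hh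
        have hkw : pvTokens.any (fun t => PySem.Chars.isIn t (PySem.Chars.lower (pvClean raw))) = true := by
          have := h
          rw [List.map_cons, List.find?_cons_of_pos (by simp [hc]; exact hh)] at this
          simpa using this
        rw [if_neg hc, hhf]
        simp only [Bool.false_eq_true, if_false]
        rw [hkw, if_pos rfl,
          show (if List.contains ([] : List (List Char)) (pvClean raw) = true
              then ([] : List (List Char)) else [] ++ [pvClean raw]) = [pvClean raw] by simp,
          if_pos (by simp only [List.length_singleton, Nat.cast_one]; omega)]
        simp

-- B-side: pvPick computes ordered dedup followed by truncation
theorem foldl_pvAdd_absorb (l : List (List Char)) (s : List (List Char)) (h : List Char)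
    (hmem : h ∈ s) :
    l.foldl pvAdd s = (l.filter (fun c => !(c == h))).foldl pvAdd s := by
  induction l generalizing s with
  | nil => rfl
  | cons x xs ih =>
    by_cases hx : x = h
    · subst hx
      have hcon : s.contains x = true := by simpa using hmem
      have : pvAdd s x = s := by unfold pvAdd; rw [hcon]; simp
      simp only [List.foldl_cons, List.filter_cons, this]
      rw [show (!(x == x)) = false by simp]
      simp only [Bool.false_eq_true, if_false]
      exact ih s hmem
    · simp only [List.foldl_cons, List.filter_cons]
      rw [show (!(x == h)) = true by simp [hx]]
      simp only [if_true]
      rw [List.foldl_cons]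
      refine ih (pvAdd s x) ?_
      unfold pvAdd; split
      · exact hmem
      · exact List.mem_append_left _ hmem

theorem foldl_pvAdd_cons_out (l : List (List Char)) (s : List (List Char)) (h : List Char)
    (hnot : h ∉ l) :
    l.foldl pvAdd (h :: s) = h :: l.foldl pvAdd s := by
  induction l generalizing s with
  | nil => rfl
  | cons x xs ih =>
    have hx : x ≠ h := fun e => hnot (e ▸ List.mem_cons_self)
    have hstep : pvAdd (h :: s) x = h :: pvAdd s x := by
      unfold pvAdd
      have hxb : (x == h) = false := beq_eq_false_iff_ne.mpr hx
      have : (h :: s).contains x = s.contains x := by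
        simp only [List.contains_cons, hxb, Bool.false_or]
      rw [this]; split <;> simp
    simp only [List.foldl_cons, hstep]
    exact ih (pvAdd s x) (fun hm => hnot (List.mem_cons_of_mem _ hm))

theorem dedup_cons (h : List Char) (rest : List (List Char)) :
    PySem.List.dedup (h :: rest) = h :: PySem.List.dedup (rest.filter (fun c => !(c == h))) := by
  have e1 : PySem.List.dedup (h :: rest) = rest.foldl pvAdd [h] := rfl
  rw [e1, foldl_pvAdd_absorb rest [h] h (List.mem_singleton.mpr rfl),
    show ([h] : List (List Char)) = h :: [] from rfl,
    foldl_pvAdd_cons_out _ _ h (by simp)]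
  rfl

theorem pvPick_nil (need : Int) : pvPick [] need = [] := by
  unfold pvPick; rfl

theorem pvPick_cons (h : List Char) (rest : List (List Char)) (need : Int) :
    pvPick (h :: rest) need
      = if need ≤ 0 then [] else h :: pvPick (rest.filter (fun c => !(c == h))) (need - 1) := by
  conv_lhs => unfold pvPick

theorem pvPick_eq_take_dedup (n : Nat) :
    ∀ (cands : List (List Char)), cands.length ≤ n → ∀ (need : Int),
      pvPick cands need = (PySem.List.dedup cands).take need.toNat := by
  induction n with
  | zero =>
    intro cands hlen need
    have : cands = [] := List.length_eq_zero_iff.mp (Nat.le_zero.mp hlen)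
    subst this
    simp [pvPick_nil, PySem.List.dedup]
  | succ m ih =>
    intro cands hlen need
    match cands with
    | [] => simp [pvPick_nil, PySem.List.dedup]
    | h :: rest =>
      rw [pvPick_cons]
      by_cases hneed : need ≤ 0
      · rw [if_pos hneed]
        have : need.toNat = 0 := by omega
        rw [this]; simp
      · rw [if_neg hneed]
        have hlen' : (rest.filter (fun c => !(c == h))).length ≤ m := by
          have := List.length_filter_le (fun c => !(c == h)) rest
          simp at hlen; omega
        rw [ih _ hlen' (need - 1), dedup_cons]
        have : need.toNat = (need - 1).toNat + 1 := by omega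
        rw [this, List.take_succ_cons]

-- ===== VERDICT (by name: the statement is the Claim_ definition above) =====
theorem extract_parent_constraints_py_spec : Claim_unchanged_extract_parent_constraints_py := by
  intro pd mi _dom hnD
  simp only [extract_parent_constraints_py, extract_parent_constraints_py_alt]
  by_cases hs : PySem.Chars.strip pd.toList = []
  · simp [hs]
  · rw [if_neg hs, if_neg hs]
    by_cases hmi : 0 < mi
    · rw [pvLoopA_lt _ [] mi (by simpa using hmi)]
      rw [foldl_pvAdd_eq_dedup, pvPick_eq_take_dedup _ _ (le_refl _)]
    · have hmi' : mi ≤ 0 := by omega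
      have hk : ((((PySem.Chars.splitlines pd.toList).map pvClean).find?
            (fun c => !c.isEmpty && !pvHeaders.contains (PySem.Chars.lower c))).any
          (fun c => pvTokens.any (fun t => PySem.Chars.isIn t (PySem.Chars.lower c)))) = false := by
        cases hfk : (((PySem.Chars.splitlines pd.toList).map pvClean).find?
            (fun c => !c.isEmpty && !pvHeaders.contains (PySem.Chars.lower c))).any
          (fun c => pvTokens.any (fun t => PySem.Chars.isIn t (PySem.Chars.lower c)))
        · rfl
        · exact absurd ⟨hmi', hs, hfk⟩ hnD
      rw [pvLoopA_le_zero_no_kw _ _ hmi' hk,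
        pvPick_eq_take_dedup _ _ (le_refl _)]
      have : mi.toNat = 0 := by omega
      rw [this]; simp

theorem extract_parent_constraints_py_changed : Claim_changed_extract_parent_constraints_py := by
  unfold Claim_changed_extract_parent_constraints_py
  refine ⟨by decide, by decide, by decide, ?_, by decide⟩
  show extract_parent_constraints_py_alt "must" 0 = []
  simp only [extract_parent_constraints_py_alt]
  rw [if_neg (by decide), pvPick_eq_take_dedup _ _ (le_refl _)]
  decide

theorem extract_parent_constraints_py_tight : Claim_exact_extract_parent_constraints_py := by
  intro pd mi _dom hD
  obtain ⟨hmi, hs, hfk⟩ := hD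
  simp only [extract_parent_constraints_py, extract_parent_constraints_py_alt]
  rw [if_neg hs, if_neg hs]
  intro heq
  rw [pvPick_eq_take_dedup _ _ (le_refl _)] at heq
  rw [show mi.toNat = 0 from by omega] at heq
  simp only [List.take_zero, List.map_nil] at heq
  exact pvLoopA_le_zero_kw _ mi hmi hfk (by simpa using heq)
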